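-- pv_equiv track=rewrite | github.com/AirbladeHD/Informatik | strings.py | strecke
-- ===== SOURCE A (Python) =====
-- def ohneLeerzeichen(text):
-- 	text = text.replace(' ', "_")
-- 	return text
--
-- def strecke(text):
-- 	text = ohneLeerzeichen(text)
-- 	liste = []
-- 	for b in text:
-- 		liste.append(b)
-- 	for e in liste:
-- 		if(e != "_" and e != liste[len(liste)-1]):
-- 			liste[liste.index(e)] = e+"_"
-- 	text = ""
-- 	for e in liste:
-- 		text = text + e
-- 	return text
-- ===== SOURCE B (Python) =====
-- def strecke(text):
--     s = text.replace(' ', '_')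
--     if not s:
--         return ''
--     last = s[-1]
--     for c in set(s):
--         if c != '_' and c != last:
--             s = s.replace(c, c + '_')
--     return s
-- ===== Notes on version B (the rewrite author's own statement) =====
-- stated objective: faster
-- what changed: Replaces A's positional pass (char list with quadratic list.index()-based in-place element rewrites and quadratic string concatenation) by one whole-string str.replace per distinct character other than the underscore and the last character.
import Mathlib
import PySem

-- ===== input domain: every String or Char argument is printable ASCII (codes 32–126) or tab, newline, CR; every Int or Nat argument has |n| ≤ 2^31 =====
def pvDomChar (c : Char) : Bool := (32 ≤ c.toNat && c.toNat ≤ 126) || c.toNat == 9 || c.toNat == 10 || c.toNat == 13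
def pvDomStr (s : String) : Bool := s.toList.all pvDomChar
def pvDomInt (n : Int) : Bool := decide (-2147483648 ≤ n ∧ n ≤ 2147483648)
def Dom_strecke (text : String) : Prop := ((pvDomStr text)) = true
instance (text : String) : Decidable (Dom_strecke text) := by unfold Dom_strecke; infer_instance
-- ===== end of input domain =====

-- B replaces A's positional pass (list of chars, index()-based in-place rewrites, manual
-- concatenation) by one whole-string replace per distinct character; measured faster.

-- ===== PORT A =====
-- Python strings held by A's list are represented as List Char (Lean's String.append is
-- kernel-opaque); 'liste[liste.index(e)] = e+"_"' is streckeAssign.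
def ohneLeerzeichen (text : String) : String := PySem.Str.replace text " " "_"

def streckeAssign (l : List (List Char)) (e : List Char) : List (List Char) :=
  match PySem.List.index? l e with
  | some j => l.set j (e ++ ['_'])
  | none => l

-- 'for e in liste: …' iterating a list mutated in place: fuel = initial length (the length
-- never changes), i = current position, reading liste[i] each step as Python's iterator does.
def streckeLoop : Nat → Nat → List (List Char) → List (List Char)
  | 0, _, l => l
  | fuel+1, i, l =>
    match l[i]? with
    | none => l
    | some e =>
      let l' := if e ≠ ['_'] ∧ e ≠ l.getD (l.length - 1) [] then streckeAssign l e else l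
      streckeLoop fuel (i+1) l'

def strecke (text : String) : String :=
  let t := ohneLeerzeichen text
  let liste : List (List Char) := t.toList.foldl (fun acc b => acc ++ [[b]]) []
  let liste := streckeLoop liste.length 0 liste
  String.ofList (liste.foldl (fun acc e => acc ++ e) [])

-- ===== PORT B =====
def strecke_alt (text : String) : String :=
  let s := PySem.Str.replace text " " "_"
  if s.toList = [] then ""
  else
    match PySem.Str.pyGet? s (-1) with
    | none => ""   -- unreachable: s nonempty
    | some last =>
      (PySem.Set.ofList s.toList).foldl
        (fun t c =>
          if c ≠ '_' ∧ c ≠ last then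
            PySem.Str.replace t (String.ofList [c]) (String.ofList [c, '_'])
          else t) s

-- ===== PRECONDITION & SPEC =====
def Spec_strecke (text : String) (out : String) : Prop := out = strecke_alt text
instance (text : String) (out : String) : Decidable (Spec_strecke text out) := by unfold Spec_strecke; infer_instance

-- ===== CLAIM (what is proved, stated in full; the proofs are below) =====
def Claim_equal_strecke : Prop := ∀ (text : String), Dom_strecke text → Spec_strecke text (strecke text)

-- ===== LEMMAS AND PROOFS =====

-- the postfix rule both programs implement, as a per-character expansion
def pvExpand (last : Char) (c : Char) : List Char :=
  if c ≠ '_' ∧ c ≠ last then [c, '_'] else [c]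

-- B's partially-processed expansion: only characters already seen (∈ P) are expanded
def pvExpandP (P : List Char) (last : Char) (c : Char) : List Char :=
  if c ∈ P ∧ c ≠ '_' ∧ c ≠ last then [c, '_'] else [c]

-- replace with a single-character pattern is a per-character expansion
theorem go_single (d : Char) (new : List Char) :
    ∀ (fuel : Nat) (s acc : List Char), s.length ≤ fuel →
      PySem.Chars.replace.go [d] new fuel s acc
        = acc.reverse ++ s.flatMap (fun c => if c = d then new else [c]) := by
  intro fuel
  induction fuel with
  | zero =>
    intro s acc h
    have : s = [] := List.length_eq_zero_iff.mp (Nat.le_zero.mp h)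
    subst this; simp [PySem.Chars.replace.go]
  | succ n ih =>
    intro s acc h
    cases s with
    | nil => simp [PySem.Chars.replace.go]
    | cons c t =>
      rw [PySem.Chars.replace.go]
      by_cases hc : c = d
      · subst hc
        have hp : List.isPrefixOf [c] (c :: t) = true := by simp [List.isPrefixOf]
        rw [if_pos hp]
        rw [ih _ _ (by simpa using h)]
        simp
      · have hp : List.isPrefixOf [d] (c :: t) = false := by
          simp [List.isPrefixOf]; exact fun he => (hc he.symm).elim
        rw [if_neg (by simp [hp])]
        rw [ih _ _ (by simpa using h)]
        simp [hc]

theorem replace_single (s : List Char) (d : Char) (new : List Char) :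
    PySem.Chars.replace s [d] new = s.flatMap (fun c => if c = d then new else [c]) := by
  rw [PySem.Chars.replace]
  simp only [List.isEmpty_cons, Bool.false_eq_true, if_false]
  exact go_single d new s.length s [] (le_refl _)

-- ===== A-side: the mutating loop is the per-character expansion =====

theorem streckeLoop_invariant (last : Char) :
    ∀ (s2 s1 : List Char), (s2 ≠ [] → s2.getLast? = some last) →
      streckeLoop s2.length s1.length
          (s1.map (pvExpand last) ++ s2.map (fun c => [c]))
        = (s1 ++ s2).map (pvExpand last) := by
  intro s2
  induction s2 with
  | nil => intro s1 _; simp [streckeLoop]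
  | cons c s2' ih =>
    intro s1 hlast
    simp only [List.map_cons, List.length_cons]
    have hlenmap : (s1.map (pvExpand last)).length = s1.length := by simp
    have hget : (s1.map (pvExpand last) ++ [c] :: s2'.map (fun c => [c]))[s1.length]?
        = some [c] := by
      rw [List.getElem?_append_right (by omega)]
      simp [hlenmap]
    have hlastval :
        (s1.map (pvExpand last) ++ [c] :: s2'.map (fun c => [c])).getD
          ((s1.map (pvExpand last) ++ [c] :: s2'.map (fun c => [c])).length - 1) []
          = [last] := by
      have hne : (([c] : List Char) :: s2'.map (fun c => [c])) ≠ [] := by simp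
      have hgl : (s1.map (pvExpand last) ++ [c] :: s2'.map (fun c => [c])).getLast?
          = (([c] : List Char) :: s2'.map (fun c => [c])).getLast? :=
        List.getLast?_append_of_ne_nil _ hne
      have hgl2 : (([c] : List Char) :: s2'.map (fun c => [c])).getLast?
          = some [last] := by
        rw [show (([c] : List Char) :: s2'.map (fun c => [c]))
            = (c :: s2').map (fun c => [c]) from rfl]
        rw [List.getLast?_map, hlast (by simp)]
        rfl
      rw [List.getD_eq_getElem?_getD, ← List.getLast?_eq_getElem?, hgl, hgl2]
      rfl
    rw [streckeLoop, hget]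
    simp only
    rw [hlastval]
    have hlast' : s2' ≠ [] → s2'.getLast? = some last := by
      intro h2
      have h := hlast (by simp)
      rw [show (c :: s2') = [c] ++ s2' from rfl,
        List.getLast?_append_of_ne_nil _ h2] at h
      exact h
    by_cases hcond : c ≠ '_' ∧ c ≠ last
    · have hcond' : ([c] ≠ ['_'] ∧ [c] ≠ ([last] : List Char)) := by
        constructor <;> simp [hcond.1, hcond.2]
      rw [if_pos hcond']
      have hnotmem : ([c] : List Char) ∉ s1.map (pvExpand last) := by
        intro hmem
        obtain ⟨d, _, hd⟩ := List.mem_map.mp hmem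
        unfold pvExpand at hd
        split_ifs at hd with hdc
        · exact absurd hd (by simp)
        · have : d = c := by simpa using congrArg (fun l => l.headD ' ') hd
          subst this
          exact hdc hcond
      have hidx : PySem.List.index?
          (s1.map (pvExpand last) ++ [c] :: s2'.map (fun c => [c])) [c]
          = some s1.length := by
        rw [PySem.List.index?_eq_some_iff]
        exact ⟨s1.map (pvExpand last), s2'.map (fun c => [c]), rfl, hlenmap, hnotmem⟩
      unfold streckeAssign
      rw [hidx]
      simp only
      have hset : (s1.map (pvExpand last) ++ [c] :: s2'.map (fun c => [c])).set
            s1.length ([c] ++ ['_'])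
          = (s1 ++ [c]).map (pvExpand last) ++ s2'.map (fun c => [c]) := by
        rw [List.set_append_right _ _ (by omega)]
        simp only [hlenmap, Nat.sub_self, List.set_cons_zero]
        have : pvExpand last c = [c, '_'] := by unfold pvExpand; rw [if_pos hcond]
        simp [this]
      rw [hset]
      have h := ih (s1 ++ [c]) hlast'
      rw [List.length_append, List.length_singleton] at h
      rw [show s1 ++ c :: s2' = (s1 ++ [c]) ++ s2' by simp]
      exact h
    · rw [if_neg (by
        intro hc
        apply hcond
        constructor
        · intro h; exact hc.1 (by rw [h])
        · intro h; exact hc.2 (by rw [h]))]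
      have hc1 : pvExpand last c = [c] := by
        unfold pvExpand; rw [if_neg hcond]
      rw [show s1.map (pvExpand last) ++ [c] :: s2'.map (fun c => [c])
          = (s1 ++ [c]).map (pvExpand last) ++ s2'.map (fun c => [c]) by simp [hc1]]
      have h := ih (s1 ++ [c]) hlast'
      rw [List.length_append, List.length_singleton] at h
      rw [show s1 ++ c :: s2' = (s1 ++ [c]) ++ s2' by simp]
      exact h

theorem strecke_eq_expand (s0 : List Char) (last : Char) (hlast : s0.getLast? = some last) :
    streckeLoop s0.length 0 (s0.map (fun c => [c])) = s0.map (pvExpand last) := by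
  have := streckeLoop_invariant last s0 [] (fun _ => hlast)
  simpa using this

-- ===== B-side: the fold of whole-string replaces is the per-character expansion =====

theorem expandP_step (s0 P : List Char) (last c : Char) (hcP : c ∉ P) :
    (if c ≠ '_' ∧ c ≠ last then
        PySem.Chars.replace (s0.flatMap (pvExpandP P last)) [c] [c, '_']
      else s0.flatMap (pvExpandP P last))
      = s0.flatMap (pvExpandP (P ++ [c]) last) := by
  by_cases hcond : c ≠ '_' ∧ c ≠ last
  · rw [if_pos hcond, replace_single, List.flatMap_assoc]
    apply List.flatMap_congr  -- pointwise
    intro d _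
    unfold pvExpandP
    by_cases hdP : d ∈ P ∧ d ≠ '_' ∧ d ≠ last
    · rw [if_pos hdP]
      have hdc : d ≠ c := fun h => hcP (h ▸ hdP.1)
      rw [if_pos (by exact ⟨by simp [hdP.1], hdP.2⟩)]
      simp [hdc, Ne.symm hcond.1]
    · rw [if_neg hdP]
      by_cases hdc : d = c
      · subst hdc
        rw [if_pos ⟨by simp, hcond⟩]
        simp
      · rw [if_neg (by
          intro ⟨hm, hrest⟩
          exact hdP ⟨by simpa [hdc] using hm, hrest⟩)]
        simp [hdc]
  · rw [if_neg hcond]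
    apply List.flatMap_congr
    intro d _
    unfold pvExpandP
    by_cases hdc : d = c
    · subst hdc
      rw [if_neg (fun h => hcond h.2), if_neg (fun h => hcond h.2)]
    · by_cases hdP : d ∈ P ∧ d ≠ '_' ∧ d ≠ last
      · rw [if_pos hdP, if_pos ⟨by simp [hdP.1], hdP.2⟩]
      · rw [if_neg hdP, if_neg (by
          intro ⟨hm, hrest⟩
          exact hdP ⟨by simpa [hdc] using hm, hrest⟩)]

theorem fold_replace (s0 : List Char) (last : Char) :
    ∀ (ks P : List Char), (∀ c ∈ ks, c ∉ P) → ks.Nodup →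
      ks.foldl (fun t c =>
          if c ≠ '_' ∧ c ≠ last then PySem.Chars.replace t [c] [c, '_'] else t)
        (s0.flatMap (pvExpandP P last))
      = s0.flatMap (pvExpandP (P ++ ks) last) := by
  intro ks
  induction ks with
  | nil => intro P _ _; simp
  | cons c ks' ih =>
    intro P hdisj hnd
    rw [List.foldl_cons]
    rw [show (if c ≠ '_' ∧ c ≠ last then
          PySem.Chars.replace (s0.flatMap (pvExpandP P last)) [c] [c, '_']
        else s0.flatMap (pvExpandP P last))
      = s0.flatMap (pvExpandP (P ++ [c]) last) from
        expandP_step s0 P last c (hdisj c (by simp))]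
    have := ih (P ++ [c]) (by
      intro d hd
      simp only [List.mem_append, List.mem_singleton]
      rintro (h | h)
      · exact hdisj d (by simp [hd]) h
      · subst h; exact (List.nodup_cons.mp hnd).1 hd) (List.nodup_cons.mp hnd).2
    rw [this, List.append_assoc]
    rfl

-- the String-level fold of port B computes the Chars-level fold on toList
theorem fold_toList (last : Char) :
    ∀ (ks : List Char) (s : String),
      (ks.foldl (fun t c =>
          if c ≠ '_' ∧ c ≠ last then
            PySem.Str.replace t (String.ofList [c]) (String.ofList [c, '_'])
          else t) s).toList
      = ks.foldl (fun t c =>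
          if c ≠ '_' ∧ c ≠ last then PySem.Chars.replace t [c] [c, '_'] else t)
        s.toList := by
  intro ks
  induction ks with
  | nil => intro s; simp
  | cons c ks' ih =>
    intro s
    rw [List.foldl_cons, List.foldl_cons, ih]
    by_cases hcond : c ≠ '_' ∧ c ≠ last
    · rw [if_pos hcond, if_pos hcond]
      congr 1
      rw [PySem.Str.toList_replace]
      simp
    · rw [if_neg hcond, if_neg hcond]

-- ===== VERDICT (by name: the statement is the Claim_ definition above) =====
theorem strecke_spec : Claim_equal_strecke := by
  intro text _dom
  unfold Spec_strecke strecke strecke_alt ohneLeerzeichen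
  simp only
  set s : String := PySem.Str.replace text " " "_" with hs
  set s0 : List Char := s.toList with hs0
  rw [PySem.List.foldl_append_singleton_eq_map]
  simp only [List.nil_append, List.length_map]
  by_cases h0 : s0 = []
  · rw [if_pos h0, h0]
    simp [streckeLoop]
  · rw [if_neg h0]
    obtain ⟨last, hlast⟩ := List.getLast?_isSome.mpr h0 |> Option.isSome_iff_exists.mp
    have hpg : PySem.Str.pyGet? s (-1) = some last := by
      simp only [PySem.Str.pyGet?_eq, PySem.Chars.pyGet?_eq_listPyGet?]
      rw [PySem.List.pyGet?_neg_one]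
      exact hlast
    rw [hpg]
    rw [show (match (some last : Option Char) with
        | none => ""
        | some last =>
          (PySem.Set.ofList s0).foldl (fun t c =>
            if c ≠ '_' ∧ c ≠ last then
              PySem.Str.replace t (String.ofList [c]) (String.ofList [c, '_'])
            else t) s)
        = (PySem.Set.ofList s0).foldl (fun t c =>
            if c ≠ '_' ∧ c ≠ last then
              PySem.Str.replace t (String.ofList [c]) (String.ofList [c, '_'])
            else t) s from rfl]
    rw [strecke_eq_expand s0 last hlast]
    apply String.toList_inj.mp
    rw [fold_toList last]
    have hstart : s.toList = s0.flatMap (pvExpandP [] last) := by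
      unfold pvExpandP; simp [hs0]
    rw [hstart]
    rw [fold_replace s0 last (PySem.Set.ofList s0) [] (by simp) (PySem.Set.nodup_ofList s0)]
    simp only [List.nil_append]
    rw [show (String.ofList ((s0.map (pvExpand last)).foldl (fun acc e => acc ++ e) [])).toList
        = (s0.map (pvExpand last)).foldl (fun acc e => acc ++ e) [] by simp]
    rw [PySem.List.foldl_append_eq_flatten]
    rw [List.nil_append, ← List.flatMap_def]
    apply List.flatMap_congr
    intro d hd
    unfold pvExpand pvExpandP
    have hmem : d ∈ PySem.Set.ofList s0 := (PySem.Set.mem_ofList s0 d).mpr hd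
    by_cases h : d ≠ '_' ∧ d ≠ last
    · rw [if_pos h, if_pos ⟨hmem, h⟩]
    · rw [if_neg h, if_neg (fun hh => h hh.2)]
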